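-- pv_equiv track=rewrite | github.com/ONSdigital/ras-frontstage | app/application.py | calculate_case_status
-- ===== SOURCE A (Python) =====
-- def calculate_case_status(caseEvents):
--     status = ''
--     for event in caseEvents:
--         if event['category'] == 'CASE_UPLOADED':
--             status = 'Complete'
--             break
--
--     if status == '':
--         for event in caseEvents:
--             if event['category'] == 'CASE_DOWNLOADED':
--                 status = 'In progress'
--                 break
--
--     if status == '':
--         status = 'Not started'
--
--     return status
-- ===== SOURCE B (Python) =====
-- def calculate_case_status(caseEvents):
--     has_downloaded = False
--     for event in caseEvents:
--         category = event['category']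
--         if category == 'CASE_UPLOADED':
--             return 'Complete'
--         if category == 'CASE_DOWNLOADED':
--             has_downloaded = True
--     return 'In progress' if has_downloaded else 'Not started'
-- ===== Notes on version B (the rewrite author's own statement) =====
-- stated objective: simpler
-- what changed: Replaces A's two sequential scans (first for CASE_UPLOADED, then for CASE_DOWNLOADED) with a single traversal that returns 'Complete' immediately on an upload and otherwise maintains one has_downloaded flag.
import Mathlib
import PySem

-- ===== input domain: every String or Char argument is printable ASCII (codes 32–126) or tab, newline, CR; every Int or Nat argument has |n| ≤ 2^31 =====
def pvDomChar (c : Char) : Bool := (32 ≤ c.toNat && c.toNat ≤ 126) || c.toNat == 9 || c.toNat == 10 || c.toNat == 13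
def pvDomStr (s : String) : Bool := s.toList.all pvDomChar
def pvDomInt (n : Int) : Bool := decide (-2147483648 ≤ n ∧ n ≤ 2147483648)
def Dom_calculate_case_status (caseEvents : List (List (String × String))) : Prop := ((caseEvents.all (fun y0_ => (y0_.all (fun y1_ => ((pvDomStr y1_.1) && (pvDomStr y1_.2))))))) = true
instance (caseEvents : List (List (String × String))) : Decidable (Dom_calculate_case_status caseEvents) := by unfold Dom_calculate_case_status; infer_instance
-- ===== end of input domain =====

-- B does the same job in one pass with a has_downloaded flag instead of A's two scans (simpler decomposition, same cost).

-- ===== PORT A =====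
-- first loop: break with 'Complete' on the first CASE_UPLOADED, else status stays ''
def pvA_loop1 : List (List (String × String)) → String
  | [] => ""
  | e :: rest =>
    if PySem.Dict.getD (PySem.Dict.ofList e) "category" "" = "CASE_UPLOADED" then "Complete" else pvA_loop1 rest

-- second loop: break with 'In progress' on the first CASE_DOWNLOADED, else status stays ''
def pvA_loop2 : List (List (String × String)) → String
  | [] => ""
  | e :: rest =>
    if PySem.Dict.getD (PySem.Dict.ofList e) "category" "" = "CASE_DOWNLOADED" then "In progress" else pvA_loop2 rest

def calculate_case_status (caseEvents : List (List (String × String))) : String :=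
  let status := pvA_loop1 caseEvents
  let status := if status = "" then pvA_loop2 caseEvents else status
  if status = "" then "Not started" else status

-- ===== PORT B =====
def pvB_loop : List (List (String × String)) → Bool → String
  | [], has_downloaded => if has_downloaded then "In progress" else "Not started"
  | e :: rest, has_downloaded =>
    let category := PySem.Dict.getD (PySem.Dict.ofList e) "category" ""
    if category = "CASE_UPLOADED" then "Complete"
    else pvB_loop rest (has_downloaded || category = "CASE_DOWNLOADED")

def calculate_case_status_alt (caseEvents : List (List (String × String))) : String :=
  pvB_loop caseEvents false

-- ===== PRECONDITION & SPEC =====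
-- Pre_ excludes exactly the inputs on which Python A raises KeyError: some event reached
-- before any CASE_UPLOADED event lacks the 'category' key (B raises there too).
def Pre_calculate_case_status (caseEvents : List (List (String × String))) : Prop :=
  ∀ e ∈ caseEvents.takeWhile
      (fun e => !(PySem.Dict.get? (PySem.Dict.ofList e) "category" == some "CASE_UPLOADED")),
    (PySem.Dict.get? (PySem.Dict.ofList e) "category").isSome

instance (caseEvents : List (List (String × String))) : Decidable (Pre_calculate_case_status caseEvents) := by unfold Pre_calculate_case_status; infer_instance

def pvWitness_calculate_case_status : (List (List (String × String))) := [[("category", "CASE_DOWNLOADED")]]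

def Spec_calculate_case_status (caseEvents : List (List (String × String))) (out : String) : Prop := out = calculate_case_status_alt caseEvents
instance (caseEvents : List (List (String × String))) (out : String) : Decidable (Spec_calculate_case_status caseEvents out) := by unfold Spec_calculate_case_status; infer_instance

-- ===== CLAIM (what is proved, stated in full; the proofs are below) =====
def Claim_equal_calculate_case_status : Prop := ∀ (caseEvents : List (List (String × String))), Dom_calculate_case_status caseEvents → Pre_calculate_case_status caseEvents → Spec_calculate_case_status caseEvents (calculate_case_status caseEvents)

-- ===== LEMMAS AND PROOFS =====

theorem pvA_loop1_cases (xs : List (List (String × String))) :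
    pvA_loop1 xs = "" ∨ pvA_loop1 xs = "Complete" := by
  induction xs with
  | nil => left; rfl
  | cons e rest ih => simp only [pvA_loop1]; split_ifs <;> simp [ih]

theorem pvA_loop2_cases (xs : List (List (String × String))) :
    pvA_loop2 xs = "" ∨ pvA_loop2 xs = "In progress" := by
  induction xs with
  | nil => left; rfl
  | cons e rest ih => simp only [pvA_loop2]; split_ifs <;> simp [ih]

theorem pvB_loop_char (xs : List (List (String × String))) (hd : Bool) :
    pvB_loop xs hd =
      if pvA_loop1 xs = "Complete" then "Complete"
      else if hd then "In progress"
      else if pvA_loop2 xs = "In progress" then "In progress"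
      else "Not started" := by
  induction xs generalizing hd with
  | nil => cases hd <;> simp [pvB_loop, pvA_loop1, pvA_loop2]
  | cons e rest ih =>
    simp only [pvB_loop, pvA_loop1, pvA_loop2]
    by_cases hu : PySem.Dict.getD (PySem.Dict.ofList e) "category" "" = "CASE_UPLOADED"
    · simp [hu]
    · by_cases hdl : PySem.Dict.getD (PySem.Dict.ofList e) "category" "" = "CASE_DOWNLOADED"
      · rcases pvA_loop1_cases rest with h | h <;> simp [hdl, ih, h]
      · simp [hu, hdl, ih]

theorem calculate_case_status_spec : Claim_equal_calculate_case_status := by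
  intro caseEvents _ _
  show calculate_case_status caseEvents = calculate_case_status_alt caseEvents
  unfold calculate_case_status calculate_case_status_alt
  rw [pvB_loop_char]
  rcases pvA_loop1_cases caseEvents with h1 | h1 <;>
    rcases pvA_loop2_cases caseEvents with h2 | h2 <;>
      simp [h1, h2]
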